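-- pv_equiv track=rewrite | github.com/RTroshin/Codewars | Python/7 kyu/Tunnel Digging.py | tunnel_digging
-- ===== SOURCE A (Python) =====
-- def tunnel_digging(r):
--     time = 0
--
--     for s in r:
--         for c in s:
--             if c in "[]":
--                 time += 30
--             elif c in "{}":
--                 time += 25
--             elif c in "()":
--                 time += 20
--             elif c in "|":
--                 time += 15
--             elif c in ":":
--                 time += 10
--
--     return time
-- ===== SOURCE B (Python) =====
-- RATES = ((30, "[]"), (25, "{}"), (20, "()"), (15, "|"), (10, ":"))
--
-- def tunnel_digging(r):
--     text = [c for s in r for c in s]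
--     return sum(w * len([c for c in text if c in chars]) for w, chars in RATES)
-- ===== Notes on version B (the rewrite author's own statement) =====
-- stated objective: alternative
-- what changed: Replaces A's single character-major pass with a chain of branch tests per character by category-major staged passes: the characters are flattened once and then, for each of the five price tiers, one filter-and-length pass counts that tier's characters, the weighted tier totals being summed at the end; no per-character branch chain remains.
import Mathlib
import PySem

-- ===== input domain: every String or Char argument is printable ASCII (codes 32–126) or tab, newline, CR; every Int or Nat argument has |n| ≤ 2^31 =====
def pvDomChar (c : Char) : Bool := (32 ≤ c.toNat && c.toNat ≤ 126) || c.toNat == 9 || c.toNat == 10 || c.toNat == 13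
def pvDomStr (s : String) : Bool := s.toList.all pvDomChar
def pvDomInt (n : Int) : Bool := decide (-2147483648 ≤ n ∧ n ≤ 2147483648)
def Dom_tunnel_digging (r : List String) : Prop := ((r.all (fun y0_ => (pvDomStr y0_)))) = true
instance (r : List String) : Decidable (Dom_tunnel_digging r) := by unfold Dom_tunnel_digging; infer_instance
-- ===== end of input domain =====

-- B replaces A's single branching accumulation pass by category-major staged passes (flatten once, one filter-and-length pass per price tier, then a weighted sum): alternative decomposition, same cost.

-- ===== PORT A =====
def tunnel_digging (r : List String) : Int :=
  r.foldl (fun time s =>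
    s.toList.foldl (fun time c =>
      if c = '[' ∨ c = ']' then time + 30
      else if c = '{' ∨ c = '}' then time + 25
      else if c = '(' ∨ c = ')' then time + 20
      else if c = '|' then time + 15
      else if c = ':' then time + 10
      else time) time) 0

-- ===== PORT B =====
def pvRates : List (Int × String) := [(30, "[]"), (25, "{}"), (20, "()"), (15, "|"), (10, ":")]

def tunnel_digging_alt (r : List String) : Int :=
  let text := r.flatMap String.toList
  (pvRates.map (fun p => p.1 * ((text.filter (fun c => c ∈ p.2.toList)).length : Int))).sum

-- ===== PRECONDITION & SPEC =====
def Spec_tunnel_digging (r : List String) (out : Int) : Prop := out = tunnel_digging_alt r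
instance (r : List String) (out : Int) : Decidable (Spec_tunnel_digging r out) := by unfold Spec_tunnel_digging; infer_instance

-- ===== CLAIM (what is proved, stated in full; the proofs are below) =====
def Claim_equal_tunnel_digging : Prop := ∀ (r : List String), Dom_tunnel_digging r → Spec_tunnel_digging r (tunnel_digging r)

-- ===== LEMMAS AND PROOFS =====

def pvStep (time : Int) (c : Char) : Int :=
  if c = '[' ∨ c = ']' then time + 30
  else if c = '{' ∨ c = '}' then time + 25
  else if c = '(' ∨ c = ')' then time + 20
  else if c = '|' then time + 15
  else if c = ':' then time + 10
  else time

theorem pvA_flat (r : List String) (t : Int) :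
    r.foldl (fun t s => s.toList.foldl pvStep t) t =
      (r.flatMap String.toList).foldl pvStep t := by
  induction r generalizing t with
  | nil => rfl
  | cons s r ih =>
    simp only [List.foldl_cons, List.flatMap_cons, List.foldl_append]
    exact ih _

theorem pvStep_foldl (L : List Char) (t : Int) :
    L.foldl pvStep t =
      t + 30 * ((L.filter (fun c => c = '[' ∨ c = ']')).length : Int)
        + 25 * ((L.filter (fun c => c = '{' ∨ c = '}')).length : Int)
        + 20 * ((L.filter (fun c => c = '(' ∨ c = ')')).length : Int)
        + 15 * ((L.filter (fun c => c = '|')).length : Int)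
        + 10 * ((L.filter (fun c => c = ':')).length : Int) := by
  induction L generalizing t with
  | nil => simp
  | cons c L ih =>
    simp only [List.foldl_cons]
    rw [ih]
    by_cases h1 : c = '[' ∨ c = ']'
    · rcases h1 with h | h <;> subst h <;> simp [pvStep] <;> ring
    by_cases h2 : c = '{' ∨ c = '}'
    · rcases h2 with h | h <;> subst h <;> simp [pvStep] <;> ring
    by_cases h3 : c = '(' ∨ c = ')'
    · rcases h3 with h | h <;> subst h <;> simp [pvStep] <;> ring
    by_cases h4 : c = '|'
    · subst h4; simp [pvStep]; ring
    by_cases h5 : c = ':'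
    · subst h5; simp [pvStep]; ring
    have h1a : ¬ c = '[' := fun h => h1 (Or.inl h)
    have h1b : ¬ c = ']' := fun h => h1 (Or.inr h)
    have h2a : ¬ c = '{' := fun h => h2 (Or.inl h)
    have h2b : ¬ c = '}' := fun h => h2 (Or.inr h)
    have h3a : ¬ c = '(' := fun h => h3 (Or.inl h)
    have h3b : ¬ c = ')' := fun h => h3 (Or.inr h)
    simp [pvStep, h1a, h1b, h2a, h2b, h3a, h3b, h4, h5]

-- ===== VERDICT (by name: the statement is the Claim_ definition above) =====
theorem tunnel_digging_spec : Claim_equal_tunnel_digging := by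
  intro r _
  show tunnel_digging r = tunnel_digging_alt r
  rw [show tunnel_digging r = (r.flatMap String.toList).foldl pvStep 0 from pvA_flat r 0]
  rw [pvStep_foldl]
  have t1 : ("[]" : String).toList = ['[', ']'] := by decide
  have t2 : ("{}" : String).toList = ['{', '}'] := by decide
  have t3 : ("()" : String).toList = ['(', ')'] := by decide
  have t4 : ("|" : String).toList = ['|'] := by decide
  have t5 : (":" : String).toList = [':'] := by decide
  simp only [tunnel_digging_alt, pvRates, List.map_cons, List.map_nil, List.sum_cons,
    List.sum_nil, t1, t2, t3, t4, t5, List.mem_cons, List.not_mem_nil,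
    or_false]
  ring
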